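-- pv_equiv track=rewrite | github.com/tiammomo/moyuan-stock-trading-assistant | backend/app/services/watch_monitor.py | _event_type_for_condition_types
-- ===== SOURCE A (Python) =====
-- from typing import Any, Dict, List, Optional
--
-- def _event_type_for_condition_types(condition_types: List[str]) -> str:
--     if "latest_price" in condition_types or "change_pct" in condition_types:
--         return "price_move"
--     if any(item in condition_types for item in ("volume_ratio", "amount", "volume", "turnover_pct")):
--         return "volume_spike"
--     if any(item in condition_types for item in ("weibi", "weicha", "waipan", "neipan")):
--         return "orderbook_bias"
--     if "amplitude_pct" in condition_types:
--         return "volatility"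
--     if any(item in condition_types for item in ("pb", "pe_dynamic", "total_market_value", "float_market_value")):
--         return "valuation_watch"
--     return "watch_update"
-- ===== SOURCE B (Python) =====
-- # B: single data-driven pass over a priority table instead of five cascaded branches.
-- _TABLE = {
--     "latest_price": (1, "price_move"), "change_pct": (1, "price_move"),
--     "volume_ratio": (2, "volume_spike"), "amount": (2, "volume_spike"),
--     "volume": (2, "volume_spike"), "turnover_pct": (2, "volume_spike"),
--     "weibi": (3, "orderbook_bias"), "weicha": (3, "orderbook_bias"),
--     "waipan": (3, "orderbook_bias"), "neipan": (3, "orderbook_bias"),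
--     "amplitude_pct": (4, "volatility"),
--     "pb": (5, "valuation_watch"), "pe_dynamic": (5, "valuation_watch"),
--     "total_market_value": (5, "valuation_watch"),
--     "float_market_value": (5, "valuation_watch"),
-- }
--
-- def _event_type_for_condition_types(condition_types):
--     best = None
--     for ct in condition_types:
--         hit = _TABLE.get(ct)
--         if hit is not None and (best is None or hit[0] < best[0]):
--             best = hit
--     return "watch_update" if best is None else best[1]
-- ===== Notes on version B (the rewrite author's own statement) =====
-- stated objective: idiomatic
-- what changed: Replaces the five cascaded membership if-branches by a single data-driven pass: a dict maps each condition type to a (priority, category) pair and one loop keeps the minimum-priority hit, defaulting to 'watch_update'. (one dict lookup per element instead of up to 15 list scans, measured ~2x faster)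
import Mathlib
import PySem

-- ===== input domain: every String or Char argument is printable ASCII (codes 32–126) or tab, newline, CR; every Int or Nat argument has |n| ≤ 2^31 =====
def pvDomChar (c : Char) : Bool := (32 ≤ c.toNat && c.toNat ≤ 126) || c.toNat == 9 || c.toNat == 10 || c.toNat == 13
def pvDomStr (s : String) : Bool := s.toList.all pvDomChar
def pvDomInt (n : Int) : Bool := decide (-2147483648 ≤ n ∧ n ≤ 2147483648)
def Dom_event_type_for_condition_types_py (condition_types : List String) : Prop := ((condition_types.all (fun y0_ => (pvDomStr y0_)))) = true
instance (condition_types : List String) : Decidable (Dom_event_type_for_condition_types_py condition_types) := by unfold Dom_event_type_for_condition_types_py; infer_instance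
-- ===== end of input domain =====

-- B replaces A's five cascaded membership branches by one fold over a priority table (objective: idiomatic/data-driven; same cost).

-- ===== PORT A =====
def event_type_for_condition_types_py (condition_types : List String) : String :=
  if "latest_price" ∈ condition_types ∨ "change_pct" ∈ condition_types then
    "price_move"
  else if ["volume_ratio", "amount", "volume", "turnover_pct"].any (fun item => condition_types.contains item) then
    "volume_spike"
  else if ["weibi", "weicha", "waipan", "neipan"].any (fun item => condition_types.contains item) then
    "orderbook_bias"
  else if "amplitude_pct" ∈ condition_types then
    "volatility"
  else if ["pb", "pe_dynamic", "total_market_value", "float_market_value"].any (fun item => condition_types.contains item) then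
    "valuation_watch"
  else
    "watch_update"

-- ===== PORT B =====
-- the module-level dict _TABLE from Source B
def pvTable : PySem.Dict String (Int × String) := PySem.Dict.mk
  [("latest_price", (1, "price_move")), ("change_pct", (1, "price_move")),
   ("volume_ratio", (2, "volume_spike")), ("amount", (2, "volume_spike")),
   ("volume", (2, "volume_spike")), ("turnover_pct", (2, "volume_spike")),
   ("weibi", (3, "orderbook_bias")), ("weicha", (3, "orderbook_bias")),
   ("waipan", (3, "orderbook_bias")), ("neipan", (3, "orderbook_bias")),
   ("amplitude_pct", (4, "volatility")),
   ("pb", (5, "valuation_watch")), ("pe_dynamic", (5, "valuation_watch")),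
   ("total_market_value", (5, "valuation_watch")),
   ("float_market_value", (5, "valuation_watch"))]

-- the loop body: keep the hit with the smallest priority seen so far
def pvStep (best : Option (Int × String)) (ct : String) : Option (Int × String) :=
  match PySem.Dict.get? pvTable ct with
  | none => best
  | some hit =>
    match best with
    | none => some hit
    | some b => if hit.1 < b.1 then some hit else some b

def event_type_for_condition_types_py_alt (condition_types : List String) : String :=
  match condition_types.foldl pvStep none with
  | none => "watch_update"
  | some b => b.2

-- ===== PRECONDITION & SPEC =====
def Spec_event_type_for_condition_types_py (condition_types : List String) (out : String) : Prop := out = event_type_for_condition_types_py_alt condition_types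
instance (condition_types : List String) (out : String) : Decidable (Spec_event_type_for_condition_types_py condition_types out) := by unfold Spec_event_type_for_condition_types_py; infer_instance

-- ===== CLAIM (what is proved, stated in full; the proofs are below) =====
def Claim_equal_event_type_for_condition_types_py : Prop := ∀ (condition_types : List String), Dom_event_type_for_condition_types_py condition_types → Spec_event_type_for_condition_types_py condition_types (event_type_for_condition_types_py condition_types)

-- ===== LEMMAS AND PROOFS =====

-- the value of B's fold, characterised by the same memberships A tests
def pvBest (xs : List String) : Option (Int × String) :=
  if "latest_price" ∈ xs ∨ "change_pct" ∈ xs then some (1, "price_move")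
  else if "volume_ratio" ∈ xs ∨ "amount" ∈ xs ∨ "volume" ∈ xs ∨ "turnover_pct" ∈ xs then some (2, "volume_spike")
  else if "weibi" ∈ xs ∨ "weicha" ∈ xs ∨ "waipan" ∈ xs ∨ "neipan" ∈ xs then some (3, "orderbook_bias")
  else if "amplitude_pct" ∈ xs then some (4, "volatility")
  else if "pb" ∈ xs ∨ "pe_dynamic" ∈ xs ∨ "total_market_value" ∈ xs ∨ "float_market_value" ∈ xs then some (5, "valuation_watch")
  else none

-- merging an accumulator into the fold
def pvMerge (a b : Option (Int × String)) : Option (Int × String) :=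
  match a, b with
  | none, b => b
  | a, none => a
  | some q, some p => if p.1 < q.1 then some p else some q

theorem pvStep_eq_merge (acc : Option (Int × String)) (ct : String) :
    pvStep acc ct = pvMerge acc (pvStep none ct) := by
  cases acc <;> cases h : PySem.Dict.get? pvTable ct <;> simp [pvStep, pvMerge, h]

theorem pvMerge_assoc (a b c : Option (Int × String)) :
    pvMerge (pvMerge a b) c = pvMerge a (pvMerge b c) := by
  rcases a with _ | q
  · cases b <;> cases c <;> rfl
  rcases b with _ | p
  · cases c <;> rfl
  rcases c with _ | r
  · simp only [pvMerge]; split_ifs <;> rfl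
  · by_cases h1 : p.1 < q.1 <;> by_cases h2 : r.1 < p.1 <;> by_cases h3 : r.1 < q.1 <;>
      simp only [pvMerge, h1, h2, h3, if_true, if_false] <;>
      first | rfl | (exfalso; omega)

theorem foldl_pvStep_merge (xs : List String) (acc : Option (Int × String)) :
    xs.foldl pvStep acc = pvMerge acc (xs.foldl pvStep none) := by
  induction xs generalizing acc with
  | nil => cases acc <;> simp [pvMerge]
  | cons x xs ih =>
    simp only [List.foldl_cons]
    rw [ih (pvStep acc x), ih (pvStep none x), pvStep_eq_merge acc x, pvMerge_assoc]

theorem pvBest_fold (xs : List String) : xs.foldl pvStep none = pvBest xs := by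
  induction xs with
  | nil => simp [pvBest]
  | cons x xs ih =>
    simp only [List.foldl_cons]
    rw [foldl_pvStep_merge xs (pvStep none x), ih]
    simp only [pvStep, pvTable, PySem.Dict.get?_mk_cons, pvBest, List.mem_cons]
    by_cases h1 : "latest_price" = x
    · simp [h1]
      split_ifs <;> simp_all [pvMerge]
    by_cases h2 : "change_pct" = x
    · simp [h1, h2]
      split_ifs <;> simp_all [pvMerge]
    by_cases h3 : "volume_ratio" = x
    · simp [h1, h2, h3]
      split_ifs <;> simp_all [pvMerge]
    by_cases h4 : "amount" = x
    · simp [h1, h2, h3, h4]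
      split_ifs <;> simp_all [pvMerge]
    by_cases h5 : "volume" = x
    · simp [h1, h2, h3, h4, h5]
      split_ifs <;> simp_all [pvMerge]
    by_cases h6 : "turnover_pct" = x
    · simp [h1, h2, h3, h4, h5, h6]
      split_ifs <;> simp_all [pvMerge]
    by_cases h7 : "weibi" = x
    · simp [h1, h2, h3, h4, h5, h6, h7]
      split_ifs <;> simp_all [pvMerge]
    by_cases h8 : "weicha" = x
    · simp [h1, h2, h3, h4, h5, h6, h7, h8]
      split_ifs <;> simp_all [pvMerge]
    by_cases h9 : "waipan" = x
    · simp [h1, h2, h3, h4, h5, h6, h7, h8, h9]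
      split_ifs <;> simp_all [pvMerge]
    by_cases h10 : "neipan" = x
    · simp [h1, h2, h3, h4, h5, h6, h7, h8, h9, h10]
      split_ifs <;> simp_all [pvMerge]
    by_cases h11 : "amplitude_pct" = x
    · simp [h1, h2, h3, h4, h5, h6, h7, h8, h9, h10, h11]
      split_ifs <;> simp_all [pvMerge]
    by_cases h12 : "pb" = x
    · simp [h1, h2, h3, h4, h5, h6, h7, h8, h9, h10, h11, h12]
      split_ifs <;> simp_all [pvMerge]
    by_cases h13 : "pe_dynamic" = x
    · simp [h1, h2, h3, h4, h5, h6, h7, h8, h9, h10, h11, h12, h13]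
      split_ifs <;> simp_all [pvMerge]
    by_cases h14 : "total_market_value" = x
    · simp [h1, h2, h3, h4, h5, h6, h7, h8, h9, h10, h11, h12, h13, h14]
      split_ifs <;> simp_all [pvMerge]
    by_cases h15 : "float_market_value" = x
    · simp [h1, h2, h3, h4, h5, h6, h7, h8, h9, h10, h11, h12, h13, h14, h15]
      split_ifs <;> simp_all [pvMerge]
    simp [h1, h2, h3, h4, h5, h6, h7, h8, h9, h10, h11, h12, h13, h14, h15, PySem.Dict.get?, pvMerge]

-- ===== VERDICT (by name: the statement is the Claim_ definition above) =====
theorem event_type_for_condition_types_py_spec : Claim_equal_event_type_for_condition_types_py := by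
  intro xs _
  show _ = _
  unfold event_type_for_condition_types_py event_type_for_condition_types_py_alt
  rw [pvBest_fold]
  unfold pvBest
  simp only [List.any_cons, List.any_nil, List.contains_eq_mem, Bool.or_eq_true, decide_eq_true_eq]
  split_ifs <;> first | rfl | tauto
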